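-- pv_equiv track=rewrite | github.com/zumbipy/PythonExercicios | ExerciciosListas/exerciciosListas-22.py | quantidade_tipo_defeitos
-- ===== SOURCE A (Python) =====
-- def quantidade_tipo_defeitos(lista_equipamento):
--     lista_defeitos = [0, 0, 0, 0]
--     for _, defeito in lista_equipamento:
--         if defeito == 1:
--             lista_defeitos[0] += 1
--         elif defeito == 2:
--             lista_defeitos[1] += 1
--         elif defeito == 3:
--             lista_defeitos[2] += 1
--         else:
--             lista_defeitos[3] += 1
--     return lista_defeitos
-- ===== SOURCE B (Python) =====
-- def quantidade_tipo_defeitos(lista_equipamento):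
--     # Staged passes: project defect codes once, then one counting pass per named
--     # bucket via list.count; the 'other' bucket is the remainder of the total.
--     defeitos = [d for _, d in lista_equipamento]
--     contagens = [defeitos.count(t) for t in (1, 2, 3)]
--     return contagens + [len(defeitos) - sum(contagens)]
-- ===== Notes on version B (the rewrite author's own statement) =====
-- stated objective: idiomatic
-- what changed: Replaces A's single pass with a per-element if/elif ladder mutating a 4-slot list by a staged pipeline: project the defect codes, count each named code 1/2/3 with list.count in separate passes, and derive the 'other' bucket by subtracting their sum from the total length.
import Mathlib
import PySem

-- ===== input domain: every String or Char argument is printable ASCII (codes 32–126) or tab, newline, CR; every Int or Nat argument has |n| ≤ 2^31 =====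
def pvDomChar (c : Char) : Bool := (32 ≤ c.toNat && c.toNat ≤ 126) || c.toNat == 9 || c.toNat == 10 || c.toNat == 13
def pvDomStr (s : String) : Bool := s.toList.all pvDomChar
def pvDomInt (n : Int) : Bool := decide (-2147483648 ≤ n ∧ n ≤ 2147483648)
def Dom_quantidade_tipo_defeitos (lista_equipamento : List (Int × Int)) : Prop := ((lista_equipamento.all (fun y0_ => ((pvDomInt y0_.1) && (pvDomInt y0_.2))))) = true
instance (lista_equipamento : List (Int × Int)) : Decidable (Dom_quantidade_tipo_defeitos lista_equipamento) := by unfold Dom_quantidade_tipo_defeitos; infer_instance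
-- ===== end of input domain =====

-- B replaces A's single-pass if/elif ladder over a fixed 4-slot list with staged passes:
-- project the defect codes, count codes 1/2/3 with list.count, derive 'other' by subtraction.


-- ===== PORT A =====
-- the body of A's for-loop: the if/elif ladder updating the 4-slot list in place
def aStep (lista_defeitos : List Int) (p : Int × Int) : List Int :=
  if p.2 == 1 then lista_defeitos.set 0 (lista_defeitos.getD 0 0 + 1)
  else if p.2 == 2 then lista_defeitos.set 1 (lista_defeitos.getD 1 0 + 1)
  else if p.2 == 3 then lista_defeitos.set 2 (lista_defeitos.getD 2 0 + 1)
  else lista_defeitos.set 3 (lista_defeitos.getD 3 0 + 1)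

def quantidade_tipo_defeitos (lista_equipamento : List (Int × Int)) : List Int :=
  lista_equipamento.foldl aStep [0, 0, 0, 0]

-- ===== PORT B =====
def quantidade_tipo_defeitos_alt (lista_equipamento : List (Int × Int)) : List Int :=
  let defeitos := lista_equipamento.map Prod.snd
  let contagens := [(1 : Int), 2, 3].map (fun t => (PySem.List.count defeitos t : Int))
  contagens ++ [(defeitos.length : Int) - contagens.sum]

-- ===== PRECONDITION & SPEC =====
def Spec_quantidade_tipo_defeitos (lista_equipamento : List (Int × Int)) (out : List Int) : Prop := out = quantidade_tipo_defeitos_alt lista_equipamento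
instance (lista_equipamento : List (Int × Int)) (out : List Int) : Decidable (Spec_quantidade_tipo_defeitos lista_equipamento out) := by unfold Spec_quantidade_tipo_defeitos; infer_instance

-- ===== CLAIM (what is proved, stated in full; the proofs are below) =====
def Claim_equal_quantidade_tipo_defeitos : Prop := ∀ (lista_equipamento : List (Int × Int)), Dom_quantidade_tipo_defeitos lista_equipamento → Spec_quantidade_tipo_defeitos lista_equipamento (quantidade_tipo_defeitos lista_equipamento)

-- ===== LEMMAS AND PROOFS =====

-- A's loop from any 4-slot state, characterised by counts of the defect codes.
theorem aloop_counts (l : List (Int × Int)) (a b c d : Int) :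
    l.foldl aStep [a, b, c, d] =
    [a + ((l.map Prod.snd).count 1 : Int), b + ((l.map Prod.snd).count 2 : Int),
     c + ((l.map Prod.snd).count 3 : Int),
     d + ((l.length : Int) - ((l.map Prod.snd).count 1 : Int)
          - ((l.map Prod.snd).count 2 : Int) - ((l.map Prod.snd).count 3 : Int))] := by
  induction l generalizing a b c d with
  | nil => simp
  | cons p t ih =>
    rw [List.foldl_cons]
    by_cases h1 : p.2 = 1
    · rw [show aStep [a, b, c, d] p = [a + 1, b, c, d] from by simp [aStep, h1], ih]
      simp only [List.map_cons, List.count_cons, List.length_cons, h1, List.cons.injEq]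
      push_cast
      simp
      omega
    · by_cases h2 : p.2 = 2
      · rw [show aStep [a, b, c, d] p = [a, b + 1, c, d] from by simp [aStep, h2], ih]
        simp only [List.map_cons, List.count_cons, List.length_cons, h2, List.cons.injEq]
        push_cast
        simp
        omega
      · by_cases h3 : p.2 = 3
        · rw [show aStep [a, b, c, d] p = [a, b, c + 1, d] from by simp [aStep, h3], ih]
          simp only [List.map_cons, List.count_cons, List.length_cons, h3, List.cons.injEq]
          push_cast
          simp
          omega
        · rw [show aStep [a, b, c, d] p = [a, b, c, d + 1] from by simp [aStep, h1, h2, h3], ih]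
          simp only [List.map_cons, List.count_cons, List.length_cons, List.cons.injEq]
          push_cast
          simp [h1, h2, h3]
          omega

-- ===== VERDICT (by name: the statement is the Claim_ definition above) =====
theorem quantidade_tipo_defeitos_spec : Claim_equal_quantidade_tipo_defeitos := by
  intro l _
  unfold Spec_quantidade_tipo_defeitos quantidade_tipo_defeitos quantidade_tipo_defeitos_alt
  rw [aloop_counts]
  simp [PySem.List.count_eq]
  omega
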